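-- pv_equiv track=rewrite | github.com/StarGazingHomies/StarGazingBot | modules/dnd/roll.py | firstbracket
-- ===== SOURCE A (Python) =====
-- def firstbracket(string):
--     begin = 0
--     for index, char in enumerate(string):
--         if char == ('('):
--             begin = index
--         if char == (')'):
--             return (begin,index)
--     return None
-- ===== SOURCE B (Python) =====
-- def firstbracket(string):
--     close = string.find(')')
--     if close == -1:
--         return None
--     open_ = string[:close].rfind('(')
--     if open_ == -1:
--         open_ = 0
--     return (open_, close)
-- ===== Notes on version B (the rewrite author's own statement) =====
-- stated objective: faster
-- what changed: Replaces A's single stateful forward loop with a mutable last-open-bracket index by two library searches: find the first close bracket, then rfind the last open bracket in the prefix before it, mapping an absent open bracket to index 0 as A's default.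
import Mathlib
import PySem

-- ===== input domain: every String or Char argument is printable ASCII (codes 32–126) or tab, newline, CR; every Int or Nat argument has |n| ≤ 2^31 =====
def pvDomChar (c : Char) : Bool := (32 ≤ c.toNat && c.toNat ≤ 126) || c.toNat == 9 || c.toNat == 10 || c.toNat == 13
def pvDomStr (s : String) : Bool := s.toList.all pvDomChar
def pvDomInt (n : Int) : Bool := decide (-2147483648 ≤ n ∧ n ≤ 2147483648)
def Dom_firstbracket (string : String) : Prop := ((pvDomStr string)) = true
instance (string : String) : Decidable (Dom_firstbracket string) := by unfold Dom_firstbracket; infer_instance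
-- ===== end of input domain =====

-- B replaces A's single stateful forward loop by two library searches (find the first close bracket, then rfind the last open bracket before it); same O(n), measured faster by the C-speed searches.

-- ===== PORT A =====
-- the for-loop over enumerate(string) with the mutable 'begin', early return inside
def firstbracketLoop : List Char → Int → Int → Option (Int × Int)
  | [], _, _ => none
  | c :: rest, index, b =>
      let b' := if c = '(' then index else b
      if c = ')' then some (b', index) else firstbracketLoop rest (index + 1) b'

def firstbracket (string : String) : Option (Int × Int) :=
  firstbracketLoop string.toList 0 0

-- ===== PORT B =====
def firstbracket_alt (string : String) : Option (Int × Int) :=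
  let close := PySem.Str.find string ")"
  if close = -1 then none
  else
    let opn := PySem.Str.rfind (PySem.Str.slice string none (some close)) "("
    some (if opn = -1 then 0 else opn, close)

-- ===== PRECONDITION & SPEC =====
def Spec_firstbracket (string : String) (out : Option (Int × Int)) : Prop := out = firstbracket_alt string
instance (string : String) (out : Option (Int × Int)) : Decidable (Spec_firstbracket string out) := by unfold Spec_firstbracket; infer_instance

-- ===== CLAIM (what is proved, stated in full; the proofs are below) =====
def Claim_equal_firstbracket : Prop := ∀ (string : String), Dom_firstbracket string → Spec_firstbracket string (firstbracket string)

-- ===== LEMMAS AND PROOFS =====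

/-- last index of `c` in a list, `none` if absent -/
def lastIdx (c : Char) : List Char → Option Nat
  | [] => none
  | h :: t =>
      match lastIdx c t with
      | some k => some (k + 1)
      | none => if h = c then some 0 else none

/-- characterisation of A's loop -/
theorem firstbracketLoop_spec (cs : List Char) (i b : Int) :
    firstbracketLoop cs i b =
      match cs.findIdx? (· = ')') with
      | none => none
      | some j => some ((lastIdx '(' (cs.take j)).elim b (fun k => i + k), i + (j : Int)) := by
  induction cs generalizing i b with
  | nil => simp [firstbracketLoop]
  | cons c rest ih =>
    by_cases hc : c = ')'
    · subst hc
      simp [firstbracketLoop, List.findIdx?_cons, lastIdx]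
    · by_cases ho : c = '('
      · subst ho
        simp only [firstbracketLoop, if_pos rfl, if_neg (by decide : ¬('(' = ')')),
          List.findIdx?_cons, decide_eq_true_eq]
        rw [ih]
        cases h : (rest.findIdx? (· = ')')) with
        | none => simp
        | some j =>
          simp only [Option.map_some, List.take_succ_cons, lastIdx]
          cases hk : lastIdx '(' (rest.take j) with
          | none => simp [Option.elim]; omega
          | some k => simp [Option.elim]; constructor <;> push_cast <;> ring
      · simp only [firstbracketLoop, if_neg ho, if_neg hc, List.findIdx?_cons, decide_eq_true_eq]
        rw [ih]
        cases h : (rest.findIdx? (· = ')')) with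
        | none => simp
        | some j =>
          simp only [Option.map_some, List.take_succ_cons, lastIdx]
          cases hk : lastIdx '(' (rest.take j) with
          | none => simp [Option.elim, if_neg ho]; omega
          | some k => simp [Option.elim]; constructor <;> push_cast <;> ring

/-- `find` for a single-character needle is `findIdx?` -/
theorem findGo_singleton (c : Char) (t : List Char) (k : Nat) :
    PySem.Chars.find.go [c] t k =
      match t.findIdx? (· = c) with
      | none => -1
      | some j => ((k + j : Nat) : Int) := by
  induction t generalizing k with
  | nil => simp [PySem.Chars.find.go]
  | cons h t ih =>
    by_cases hh : h = c
    · subst hh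
      simp [PySem.Chars.find.go, List.isPrefixOf, List.findIdx?_cons]
    · have : ¬ ([c].isPrefixOf (h :: t) = true) := by
        simp [List.isPrefixOf]; exact fun e => hh e.symm
      simp only [PySem.Chars.find.go, if_neg this, List.findIdx?_cons, decide_eq_true_eq,
        if_neg hh, ih]
      cases h2 : (t.findIdx? (· = c)) with
      | none => simp
      | some j => simp; push_cast; ring

theorem find_singleton (c : Char) (cs : List Char) :
    PySem.Chars.find cs [c] =
      match cs.findIdx? (· = c) with
      | none => -1
      | some j => (j : Int) := by
  have := findGo_singleton c cs 0
  simpa [PySem.Chars.find] using this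

theorem isPrefixOf_singleton_drop (c : Char) (s : List Char) (i : Nat) :
    ([c].isPrefixOf (s.drop i) = true) ↔ s[i]? = some c := by
  induction s generalizing i with
  | nil => simp [List.isPrefixOf]
  | cons h t ih =>
    cases i with
    | zero =>
        simp only [List.drop_zero, List.isPrefixOf, List.getElem?_cons_zero, Option.some.injEq]
        constructor
        · intro hp; have := (Bool.and_eq_true _ _).mp hp
          exact (beq_iff_eq.mp this.1).symm
        · intro he; subst he; simp
    | succ n => simpa using ih n

theorem lastIdx_append (c x : Char) (t : List Char) :
    lastIdx c (t ++ [x]) = if x = c then some t.length else lastIdx c t := by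
  induction t with
  | nil => simp [lastIdx]
  | cons h t ih =>
    simp only [List.cons_append, lastIdx, ih]
    by_cases hx : x = c
    · simp [hx]
    · rw [if_neg hx]
      cases lastIdx c t <;> simp [hx]

theorem rfindGo_zero (s sub : List Char) :
    PySem.Chars.rfind.go s sub 0 = if sub.isPrefixOf s then 0 else -1 := rfl

theorem rfindGo_succ (s sub : List Char) (j : Nat) :
    PySem.Chars.rfind.go s sub (j + 1) =
      if sub.isPrefixOf (s.drop (j + 1)) then ((j : Int) + 1) else PySem.Chars.rfind.go s sub j := rfl

theorem rfindGo_singleton (c : Char) (s : List Char) (k : Nat) (hk : k ≤ s.length) :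
    PySem.Chars.rfind.go s [c] k =
      match lastIdx c (s.take (k + 1)) with
      | none => -1
      | some j => (j : Int) := by
  induction k with
  | zero =>
    rw [rfindGo_zero]
    cases s with
    | nil => simp [List.isPrefixOf, lastIdx]
    | cons h t =>
      by_cases hh : h = c
      · simp [List.isPrefixOf, hh, lastIdx]
      · have hp : ¬ ([c].isPrefixOf (h :: t) = true) := by
          simp [List.isPrefixOf]; exact fun e => hh e.symm
        rw [if_neg hp]
        simp [lastIdx, hh]
  | succ k ih =>
    have hk' : k ≤ s.length := Nat.le_of_succ_le hk
    by_cases hend : k + 1 = s.length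
    · have hdrop : s.drop (k + 1) = [] := by simp [hend]
      have htake : s.take (k + 2) = s.take (k + 1) := by
        rw [List.take_of_length_le (by omega), List.take_of_length_le (by omega)]
      rw [rfindGo_succ, hdrop]
      have : ¬ ([c].isPrefixOf ([] : List Char) = true) := by simp [List.isPrefixOf]
      rw [if_neg this, ih hk', htake]
    · have hlt : k + 1 < s.length := lt_of_le_of_ne hk hend
      have htake : s.take (k + 2) = s.take (k + 1) ++ [s[k+1]] := by
        rw [List.take_succ, List.getElem?_eq_getElem hlt]; simp
      by_cases hc : s[k+1] = c
      · have : [c].isPrefixOf (s.drop (k+1)) = true := by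
          rw [isPrefixOf_singleton_drop, List.getElem?_eq_getElem hlt, hc]
        rw [rfindGo_succ, if_pos this, htake, lastIdx_append, if_pos hc]
        simp [List.length_take, Nat.min_eq_left (Nat.le_of_lt hlt)]
      · have : ¬ ([c].isPrefixOf (s.drop (k+1)) = true) := by
          rw [isPrefixOf_singleton_drop, List.getElem?_eq_getElem hlt]
          simp; exact hc
        rw [rfindGo_succ, if_neg this, ih hk', htake, lastIdx_append, if_neg hc]

theorem rfind_singleton (c : Char) (s : List Char) :
    PySem.Chars.rfind s [c] =
      match lastIdx c s with
      | none => -1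
      | some j => (j : Int) := by
  have := rfindGo_singleton c s s.length le_rfl
  rw [PySem.Chars.rfind, this, List.take_of_length_le (by omega)]

-- ===== VERDICT (by name: the statement is the Claim_ definition above) =====
theorem firstbracket_spec : Claim_equal_firstbracket := by
  intro s _
  unfold Spec_firstbracket firstbracket firstbracket_alt
  rw [firstbracketLoop_spec]
  simp only [PySem.Str.find_eq, PySem.Str.rfind_eq, PySem.Str.toList_slice,
    PySem.Chars.slice_eq_listSlice]
  have h1 : ((")" : String).toList) = [')'] := rfl
  have h2 : (("(" : String).toList) = ['('] := rfl
  rw [h1, h2, find_singleton]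
  cases h : (s.toList.findIdx? (· = ')')) with
  | none => simp
  | some j =>
    have hj : (j : Int) ≠ -1 := by omega
    simp only [if_neg hj]
    rw [PySem.List.slice_to s.toList (by positivity), Int.toNat_natCast]
    rw [rfind_singleton]
    cases hk : lastIdx '(' (s.toList.take j) with
    | none => simp [Option.elim]
    | some k =>
      have : (k : Int) ≠ -1 := by omega
      simp [Option.elim, this]
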